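-- pv_equiv track=rewrite | github.com/guasonito0/Hill-Cypher | Hill_Cipher.py | text_issue
-- ===== SOURCE A (Python) =====
-- def text_issue(text,square):
--     i=1
--     while square*i<len(text):
--         i=i+1
--     res=i*square
--     diff=res-len(plaintext)
--     for i in range(0,diff):
--         text.append("z")
--     return res
--
-- plaintext="teamomucho"
-- ===== SOURCE B (Python) =====
-- def text_issue(text, square):
--     # Closed-form ceiling instead of the linear search; same in-place 'z' padding.
--     n = len(text)
--     i = 1 if n == 0 else -(-n // square)
--     res = i * square
--     for _ in range(res - len(plaintext)):
--         text.append("z")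
--     return res
--
-- plaintext = "teamomucho"
-- ===== Notes on version B (the rewrite author's own statement) =====
-- stated objective: simpler
-- what changed: The while-loop that linearly searches for the smallest i with square*i >= len(text) is replaced by a closed-form ceiling division -(-n//square) (with i=1 for empty text); the in-place 'z' padding is kept identical.
import Mathlib
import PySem

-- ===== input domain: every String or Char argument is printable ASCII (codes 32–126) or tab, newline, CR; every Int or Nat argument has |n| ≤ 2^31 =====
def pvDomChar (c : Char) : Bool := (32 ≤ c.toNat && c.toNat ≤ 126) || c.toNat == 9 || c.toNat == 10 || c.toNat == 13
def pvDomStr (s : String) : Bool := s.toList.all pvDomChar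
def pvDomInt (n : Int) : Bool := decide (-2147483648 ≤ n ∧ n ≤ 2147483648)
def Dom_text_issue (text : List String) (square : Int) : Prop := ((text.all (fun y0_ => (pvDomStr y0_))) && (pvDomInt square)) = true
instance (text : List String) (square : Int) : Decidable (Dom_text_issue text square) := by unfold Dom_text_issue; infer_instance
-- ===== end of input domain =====

-- B replaces A's linear search for the smallest i with square*i >= len(text) by a
-- closed-form ceiling division; equivalence is about the RETURN value only (both
-- Pythons append "z" to text in place identically).

-- ===== PORT A =====
-- the while-loop of A; the '0 < square' conjunct only makes the recursion total:
-- it fails exactly where Python's loop never terminates (excluded by Pre_).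
def textIssueLoop (n square i : Int) : Int :=
  if h : square * i < n ∧ 0 < square then textIssueLoop n square (i + 1) else i
termination_by (n - square * i).toNat
decreasing_by
  have : square * (i + 1) = square * i + square := by ring
  omega

def text_issue (text : List String) (square : Int) : Int :=
  let i := textIssueLoop (text.length : Int) square 1
  i * square

-- ===== PORT B =====
def text_issue_alt (text : List String) (square : Int) : Int :=
  let n : Int := (text.length : Int)
  let i : Int := if n = 0 then 1 else -(PySem.Int.floordiv (-n) square)
  i * square

-- ===== PRECONDITION & SPEC =====
-- Pre_ excludes exactly the inputs where A's while-loop never terminates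
-- (square < 0, or square = 0 with nonempty text): Python A returns nowhere else.
def Pre_text_issue (text : List String) (square : Int) : Prop :=
  1 ≤ square ∨ (square = 0 ∧ text = [])
instance (text : List String) (square : Int) : Decidable (Pre_text_issue text square) := by
  unfold Pre_text_issue; infer_instance

def pvWitness_text_issue : List String × Int := (["ab", "cd", "e"], 2)

def Spec_text_issue (text : List String) (square : Int) (out : Int) : Prop := out = text_issue_alt text square
instance (text : List String) (square : Int) (out : Int) : Decidable (Spec_text_issue text square out) := by unfold Spec_text_issue; infer_instance

-- ===== CLAIM (what is proved, stated in full; the proofs are below) =====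
def Claim_equal_text_issue : Prop := ∀ (text : List String) (square : Int), Dom_text_issue text square → Pre_text_issue text square → Spec_text_issue text square (text_issue text square)

-- ===== LEMMAS AND PROOFS =====

-- the loop returns c whenever i ≤ c, square*(c-1) < n ≤ square*c (square positive)
theorem textIssueLoop_eq (n square : Int) (hsq : 0 < square) :
    ∀ (i c : Int), i ≤ c → square * (c - 1) < n → n ≤ square * c →
      textIssueLoop n square i = c := by
  intro i
  induction i using textIssueLoop.induct n square with
  | case1 i h ih =>
      intro c hic h1 h2
      rw [textIssueLoop, dif_pos h]
      apply ih
      · -- i + 1 ≤ c : from square*i < n ≤ square*c and monotonicity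
        by_contra hlt
        have hci : c ≤ i := by omega
        have : square * c ≤ square * i := by
          exact mul_le_mul_of_nonneg_left hci (le_of_lt hsq)
        omega
      · exact h1
      · exact h2
  | case2 i h =>
      intro c hic h1 h2
      rw [textIssueLoop, dif_neg h]
      -- here square*i ≥ n (since 0 < square); with square*(c-1) < n get c ≤ i
      have hni : n ≤ square * i := by
        by_contra hlt
        exact h ⟨by omega, hsq⟩
      have hci : c ≤ i := by
        by_contra hlt
        have : square * i ≤ square * (c - 1) :=
          mul_le_mul_of_nonneg_left (by omega) (le_of_lt hsq)
        omega
      omega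

-- the ceiling value -((-n) // square) satisfies the two loop brackets (0 < square, 0 < n)
theorem ceil_brackets (n square : Int) (hsq : 0 < square) (hn : 0 < n) :
    square * (-(PySem.Int.floordiv (-n) square) - 1) < n ∧
    n ≤ square * (-(PySem.Int.floordiv (-n) square)) ∧
    1 ≤ -(PySem.Int.floordiv (-n) square) := by
  obtain ⟨hb1, hb2⟩ : (-(PySem.Int.floordiv (-n) square) - 1) * square < n ∧
      n ≤ -(PySem.Int.floordiv (-n) square) * square :=
    (PySem.Int.neg_floordiv_neg_eq_iff_of_pos hsq).mp rfl
  refine ⟨by nlinarith, by nlinarith, ?_⟩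
  -- 1 ≤ c: if c ≤ 0 then c*square ≤ 0 < n, contradiction with n ≤ c*square
  by_contra hc
  have : -(PySem.Int.floordiv (-n) square) * square ≤ 0 := by
    apply mul_nonpos_of_nonpos_of_nonneg (by omega) (le_of_lt hsq)
  omega

-- ===== VERDICT (by name: the statement is the Claim_ definition above) =====
theorem text_issue_spec : Claim_equal_text_issue := by
  intro text square _ hpre
  simp only [Spec_text_issue, text_issue, text_issue_alt]
  rcases hpre with hsq | ⟨hz, ht⟩
  · by_cases hn : (text.length : Int) = 0
    · -- empty text: the loop condition square*1 < 0 is false, both sides give 1*square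
      have h1 : textIssueLoop (text.length : Int) square 1 = 1 := by
        rw [textIssueLoop, dif_neg]; omega
      rw [h1, if_pos hn]
    · have hnpos : 0 < (text.length : Int) := by omega
      obtain ⟨hb1, hb2, hb3⟩ := ceil_brackets (text.length : Int) square (by omega) hnpos
      have h1 := textIssueLoop_eq (text.length : Int) square (by omega) 1
        (-(PySem.Int.floordiv (-(text.length : Int)) square)) hb3 hb1 hb2
      rw [h1, if_neg hn]
  · -- square = 0 and text = []
    subst hz ht
    have h1 : textIssueLoop ((List.length ([] : List String) : Nat) : Int) 0 1 = 1 := by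
      rw [textIssueLoop, dif_neg]; omega
    rw [h1, if_pos (by simp)]
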